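-- pv_equiv track=rewrite | github.com/chungty/abm-research | src/abm_research/phases/apollo_contact_discovery.py | _map_to_buying_committee_role
-- ===== SOURCE A (Python) =====
-- def _map_to_buying_committee_role(title: str, seniority: str) -> str:
--     """
--     Map contact title and seniority to buying committee roles
--     Used for ABM campaign segmentation
--     """
--     if not title:
--         return "Unknown"
--
--     title_lower = title.lower()
--
--     # Decision makers
--     if any(
--         keyword in title_lower
--         for keyword in ["cto", "cio", "vp", "chief", "head of", "director"]
--     ):
--         return "Decision Maker"
--
--     # Technical influencers
--     elif any(
--         keyword in title_lower
--         for keyword in ["senior", "lead", "principal", "staff", "architect"]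
--     ):
--         return "Technical Influencer"
--
--     # End users
--     elif any(
--         keyword in title_lower for keyword in ["engineer", "developer", "analyst", "specialist"]
--     ):
--         return "End User"
--
--     # Procurers (if we find procurement/finance folks)
--     elif any(
--         keyword in title_lower for keyword in ["procurement", "finance", "budget", "purchasing"]
--     ):
--         return "Economic Buyer"
--
--     return "Technical Influencer"  # Default for technical roles
-- ===== SOURCE B (Python) =====
-- # Min-rank aggregation: a flat keyword -> priority map; the role is the one of the
-- # lowest-rank keyword found anywhere in the title (min over all matches), instead of
-- # A's grouped first-match if/elif chain.
-- _KEYWORD_RANK = {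
--     "cto": 0, "cio": 0, "vp": 0, "chief": 0, "head of": 0, "director": 0,
--     "senior": 1, "lead": 1, "principal": 1, "staff": 1, "architect": 1,
--     "engineer": 2, "developer": 2, "analyst": 2, "specialist": 2,
--     "procurement": 3, "finance": 3, "budget": 3, "purchasing": 3,
-- }
-- _ROLES = ["Decision Maker", "Technical Influencer", "End User", "Economic Buyer"]
--
-- def _map_to_buying_committee_role(title: str, seniority: str) -> str:
--     if not title:
--         return "Unknown"
--     t = title.lower()
--     best = min((rank for kw, rank in _KEYWORD_RANK.items() if kw in t), default=1)
--     return _ROLES[best]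
-- ===== Notes on version B (the rewrite author's own statement) =====
-- stated objective: alternative
-- what changed: Replaced the grouped first-match if/elif chain by a flat keyword-to-priority map aggregated with min: the role is that of the lowest-rank keyword occurring in the title (default rank 1), which coincides with A's group priority order.
import Mathlib
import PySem

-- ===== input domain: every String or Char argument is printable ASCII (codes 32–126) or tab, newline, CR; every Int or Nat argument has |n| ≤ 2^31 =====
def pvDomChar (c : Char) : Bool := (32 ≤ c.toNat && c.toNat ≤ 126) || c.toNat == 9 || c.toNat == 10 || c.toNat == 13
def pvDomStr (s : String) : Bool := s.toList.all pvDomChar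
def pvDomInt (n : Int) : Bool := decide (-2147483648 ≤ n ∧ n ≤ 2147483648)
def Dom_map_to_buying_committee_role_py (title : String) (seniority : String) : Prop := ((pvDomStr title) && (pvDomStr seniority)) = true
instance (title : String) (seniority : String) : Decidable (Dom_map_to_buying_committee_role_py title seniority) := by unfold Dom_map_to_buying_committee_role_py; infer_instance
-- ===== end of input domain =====

-- B replaces A's grouped first-match if/elif chain by min-rank aggregation over a flat
-- keyword->priority map (alternative decomposition; same cost).

-- ===== PORT A =====
def map_to_buying_committee_role_py (title : String) (seniority : String) : String :=
  if title = "" then "Unknown"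
  else
    let title_lower := PySem.Str.lower title
    if (["cto", "cio", "vp", "chief", "head of", "director"]).any
        (fun keyword => PySem.Str.isIn keyword title_lower) then "Decision Maker"
    else if (["senior", "lead", "principal", "staff", "architect"]).any
        (fun keyword => PySem.Str.isIn keyword title_lower) then "Technical Influencer"
    else if (["engineer", "developer", "analyst", "specialist"]).any
        (fun keyword => PySem.Str.isIn keyword title_lower) then "End User"
    else if (["procurement", "finance", "budget", "purchasing"]).any
        (fun keyword => PySem.Str.isIn keyword title_lower) then "Economic Buyer"
    else "Technical Influencer"

-- ===== PORT B =====
-- flat dict keyword -> rank (insertion-order association list)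
def pvKeywordRank : List (String × Nat) :=
  [("cto", 0), ("cio", 0), ("vp", 0), ("chief", 0), ("head of", 0), ("director", 0),
   ("senior", 1), ("lead", 1), ("principal", 1), ("staff", 1), ("architect", 1),
   ("engineer", 2), ("developer", 2), ("analyst", 2), ("specialist", 2),
   ("procurement", 3), ("finance", 3), ("budget", 3), ("purchasing", 3)]

def pvRoles : List String := ["Decision Maker", "Technical Influencer", "End User", "Economic Buyer"]

def map_to_buying_committee_role_py_alt (title : String) (seniority : String) : String :=
  if title = "" then "Unknown"
  else
    -- best = min((rank for kw, rank in _KEYWORD_RANK.items() if kw in t), default=1)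
    let t := PySem.Str.lower title
    let best := ((pvKeywordRank.filterMap
      (fun p => if PySem.Str.isIn p.1 t then some p.2 else none)).min?).getD 1
    -- _ROLES[best]; best ≤ 3 always, so the plain index never raises
    pvRoles.getD best ""

-- ===== PRECONDITION & SPEC =====
def Spec_map_to_buying_committee_role_py (title : String) (seniority : String) (out : String) : Prop := out = map_to_buying_committee_role_py_alt title seniority
instance (title : String) (seniority : String) (out : String) : Decidable (Spec_map_to_buying_committee_role_py title seniority out) := by unfold Spec_map_to_buying_committee_role_py; infer_instance

-- ===== CLAIM (what is proved, stated in full; the proofs are below) =====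
def Claim_equal_map_to_buying_committee_role_py : Prop := ∀ (title : String) (seniority : String), Dom_map_to_buying_committee_role_py title seniority → Spec_map_to_buying_committee_role_py title seniority (map_to_buying_committee_role_py title seniority)

-- ===== LEMMAS AND PROOFS =====

def pvG0 : List String := ["cto", "cio", "vp", "chief", "head of", "director"]
def pvG1 : List String := ["senior", "lead", "principal", "staff", "architect"]
def pvG2 : List String := ["engineer", "developer", "analyst", "specialist"]
def pvG3 : List String := ["procurement", "finance", "budget", "purchasing"]

theorem pvTableSplit :
    pvKeywordRank
      = pvG0.map (fun k => (k, (0 : Nat))) ++ pvG1.map (fun k => (k, 1))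
        ++ pvG2.map (fun k => (k, 2)) ++ pvG3.map (fun k => (k, 3)) := rfl

theorem pvFmMap (g : List String) (r : Nat) (test : String → Bool) :
    (g.map (fun k => (k, r))).filterMap
        (fun p => if test p.1 then some p.2 else none)
      = (g.filter test).map (fun _ => r) := by
  induction g with
  | nil => rfl
  | cons x xs ih => by_cases hx : test x <;> simp [hx, ih]

theorem pvMinMem {l : List Nat} {a : Nat} (hmem : a ∈ l) (hle : ∀ b ∈ l, a ≤ b) :
    l.min? = some a :=
  List.min?_eq_some_iff.mpr ⟨hmem, hle⟩

theorem pvBridge (test : String → Bool) :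
    pvRoles.getD
        ((((pvG0.filter test).map (fun _ => (0 : Nat)) ++ (pvG1.filter test).map (fun _ => 1)
            ++ (pvG2.filter test).map (fun _ => 2) ++ (pvG3.filter test).map (fun _ => 3)).min?).getD 1) ""
      = if pvG0.any test then "Decision Maker"
        else if pvG1.any test then "Technical Influencer"
        else if pvG2.any test then "End User"
        else if pvG3.any test then "Economic Buyer"
        else "Technical Influencer" := by
  by_cases h0 : pvG0.any test = true
  · obtain ⟨x, hx, htx⟩ := List.any_eq_true.mp h0
    have hmem : (0 : Nat) ∈ (pvG0.filter test).map (fun _ => (0 : Nat))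
        ++ (pvG1.filter test).map (fun _ => 1)
        ++ (pvG2.filter test).map (fun _ => 2) ++ (pvG3.filter test).map (fun _ => 3) := by
      simp only [List.mem_append, List.mem_map, List.mem_filter]
      exact Or.inl (Or.inl (Or.inl ⟨x, ⟨hx, htx⟩, trivial⟩))
    rw [pvMinMem hmem (fun b _ => Nat.zero_le b)]
    simp [h0, pvRoles]
  · have e0 : pvG0.filter test = [] :=
      List.filter_eq_nil_iff.mpr (fun a ha hta => h0 (List.any_eq_true.mpr ⟨a, ha, hta⟩))
    rw [e0, List.map_nil, List.nil_append]
    by_cases h1 : pvG1.any test = true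
    · obtain ⟨x, hx, htx⟩ := List.any_eq_true.mp h1
      have hmem : (1 : Nat) ∈ (pvG1.filter test).map (fun _ => (1 : Nat))
          ++ (pvG2.filter test).map (fun _ => 2) ++ (pvG3.filter test).map (fun _ => 3) := by
        simp only [List.mem_append, List.mem_map, List.mem_filter]
        exact Or.inl (Or.inl ⟨x, ⟨hx, htx⟩, trivial⟩)
      have hle : ∀ b ∈ (pvG1.filter test).map (fun _ => (1 : Nat))
          ++ (pvG2.filter test).map (fun _ => 2) ++ (pvG3.filter test).map (fun _ => 3), 1 ≤ b := by
        intro b hb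
        simp only [List.mem_append, List.mem_map, List.mem_filter] at hb
        rcases hb with (⟨_, _, rfl⟩ | ⟨_, _, rfl⟩) | ⟨_, _, rfl⟩ <;> omega
      rw [pvMinMem hmem hle]
      simp [h0, h1, pvRoles]
    · have e1 : pvG1.filter test = [] :=
        List.filter_eq_nil_iff.mpr (fun a ha hta => h1 (List.any_eq_true.mpr ⟨a, ha, hta⟩))
      rw [e1, List.map_nil, List.nil_append]
      by_cases h2 : pvG2.any test = true
      · obtain ⟨x, hx, htx⟩ := List.any_eq_true.mp h2
        have hmem : (2 : Nat) ∈ (pvG2.filter test).map (fun _ => (2 : Nat))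
            ++ (pvG3.filter test).map (fun _ => 3) := by
          simp only [List.mem_append, List.mem_map, List.mem_filter]
          exact Or.inl ⟨x, ⟨hx, htx⟩, trivial⟩
        have hle : ∀ b ∈ (pvG2.filter test).map (fun _ => (2 : Nat))
            ++ (pvG3.filter test).map (fun _ => 3), 2 ≤ b := by
          intro b hb
          simp only [List.mem_append, List.mem_map, List.mem_filter] at hb
          rcases hb with ⟨_, _, rfl⟩ | ⟨_, _, rfl⟩ <;> omega
        rw [pvMinMem hmem hle]
        simp [h0, h1, h2, pvRoles]
      · have e2 : pvG2.filter test = [] :=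
          List.filter_eq_nil_iff.mpr (fun a ha hta => h2 (List.any_eq_true.mpr ⟨a, ha, hta⟩))
        rw [e2, List.map_nil, List.nil_append]
        by_cases h3 : pvG3.any test = true
        · obtain ⟨x, hx, htx⟩ := List.any_eq_true.mp h3
          have hmem : (3 : Nat) ∈ (pvG3.filter test).map (fun _ => (3 : Nat)) := by
            simp only [List.mem_map, List.mem_filter]
            exact ⟨x, ⟨hx, htx⟩, trivial⟩
          have hle : ∀ b ∈ (pvG3.filter test).map (fun _ => (3 : Nat)), 3 ≤ b := by
            intro b hb
            simp only [List.mem_map, List.mem_filter] at hb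
            obtain ⟨_, _, rfl⟩ := hb; omega
          rw [pvMinMem hmem hle]
          simp [h0, h1, h2, h3, pvRoles]
        · have e3 : pvG3.filter test = [] :=
            List.filter_eq_nil_iff.mpr (fun a ha hta => h3 (List.any_eq_true.mpr ⟨a, ha, hta⟩))
          rw [e3, List.map_nil]
          simp [h0, h1, h2, h3, pvRoles]

-- ===== VERDICT (by name: the statement is the Claim_ definition above) =====
theorem map_to_buying_committee_role_py_spec : Claim_equal_map_to_buying_committee_role_py := by
  intro title seniority _
  unfold Spec_map_to_buying_committee_role_py map_to_buying_committee_role_py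
    map_to_buying_committee_role_py_alt
  by_cases ht : title = ""
  · simp [ht]
  · simp only [if_neg ht]
    generalize PySem.Str.lower title = t
    rw [pvTableSplit]
    simp only [List.filterMap_append]
    rw [pvFmMap pvG0 0 (fun k => PySem.Str.isIn k t), pvFmMap pvG1 1 (fun k => PySem.Str.isIn k t),
      pvFmMap pvG2 2 (fun k => PySem.Str.isIn k t), pvFmMap pvG3 3 (fun k => PySem.Str.isIn k t)]
    rw [show (["cto", "cio", "vp", "chief", "head of", "director"] : List String) = pvG0 from rfl,
      show (["senior", "lead", "principal", "staff", "architect"] : List String) = pvG1 from rfl,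
      show (["engineer", "developer", "analyst", "specialist"] : List String) = pvG2 from rfl,
      show (["procurement", "finance", "budget", "purchasing"] : List String) = pvG3 from rfl]
    exact (pvBridge (fun k => PySem.Str.isIn k t)).symm
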